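-- pv_equiv track=rewrite | github.com/ab180/dbt-plan | src/dbt_plan/manifest.py | find_downstream
-- ===== SOURCE A (Python) =====
-- from collections import deque
--
-- def find_downstream(
--     node_id: str,
--     child_map: dict[str, list[str]],
--     models_only: bool = True,
-- ) -> list[str]:
--     """Find all recursive downstream dependents of a node.
--
--     Uses BFS with visited set for cycle protection.
--     Filters out test/source nodes when models_only=True.
--
--     Returns:
--         Sorted list of downstream node_ids (excluding starting node).
--     """
--     visited = {node_id}
--     queue: deque[str] = deque()
--     result: list[str] = []
--
--     for child in child_map.get(node_id) or []:
--         if child not in visited: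
--             visited.add(child)
--             queue.append(child)
--
--     while queue:
--         current = queue.popleft()
--         if not models_only or current.startswith("model."):
--             result.append(current)
--         for child in child_map.get(current) or []:
--             if child not in visited:
--                 visited.add(child)
--                 queue.append(child)
--
--     return sorted(result)
-- ===== SOURCE B (Python) =====
-- def find_downstream(
--     node_id: str,
--     child_map: dict[str, list[str]],
--     models_only: bool = True,
-- ) -> list[str]:
--     """Compute the downstream set by fixed-point saturation, then filter and sort."""
--     visited = {node_id}
--     changed = True
--     while changed:
--         changed = False
--         for current in list(visited):
--             for child in child_map.get(current) or []:
--                 if child not in visited: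
--                     visited.add(child)
--                     changed = True
--     return sorted(
--         n for n in visited
--         if n != node_id and (not models_only or n.startswith("model."))
--     )
-- ===== Notes on version B (the rewrite author's own statement) =====
-- stated objective: alternative
-- what changed: Replaced the explicit BFS queue/visited traversal by a fixed-point saturation: repeatedly sweep the current visited set adding children of visited nodes until nothing changes, then filter (drop the start node and, when models_only, non-model nodes) and sort; since the output is sorted, traversal order is irrelevant.
import Mathlib
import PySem

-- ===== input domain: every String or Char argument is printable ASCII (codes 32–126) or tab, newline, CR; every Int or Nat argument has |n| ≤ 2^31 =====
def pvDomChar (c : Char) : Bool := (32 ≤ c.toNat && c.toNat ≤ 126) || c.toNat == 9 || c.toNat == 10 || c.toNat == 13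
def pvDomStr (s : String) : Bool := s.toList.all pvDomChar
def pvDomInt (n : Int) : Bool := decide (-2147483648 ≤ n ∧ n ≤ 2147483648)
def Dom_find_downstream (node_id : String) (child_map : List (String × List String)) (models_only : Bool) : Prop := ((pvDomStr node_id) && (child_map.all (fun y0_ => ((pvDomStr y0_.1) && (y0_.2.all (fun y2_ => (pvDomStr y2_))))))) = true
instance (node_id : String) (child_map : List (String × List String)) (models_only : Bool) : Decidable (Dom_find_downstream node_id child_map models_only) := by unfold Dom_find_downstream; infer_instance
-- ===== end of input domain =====

-- B replaces A's BFS queue traversal by a fixed-point saturation of the visited set followed by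
-- filter-and-sort (objective: alternative algorithm, same results since the output is sorted).

-- ===== PORT A =====
-- child_map.get(k) or []  (shared lookup primitive; first-match association-list lookup)
def pvChildren (child_map : List (String × List String)) (k : String) : List String :=
  match child_map.find? (fun p => p.1 == k) with
  | some p => p.2
  | none => []

-- 'if child not in visited: visited.add(child); queue.append(child)'
def pvBfsStep (s : PySem.Set String × List String) (child : String) : PySem.Set String × List String :=
  if PySem.Set.contains s.1 child then s else (PySem.Set.add s.1 child, s.2 ++ [child])

-- the 'while queue:' loop; fuel only makes it total (proved sufficient below)
def pvBfsLoop (child_map : List (String × List String)) (models_only : Bool) :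
    Nat → List String → PySem.Set String → List String → List String
  | _, [], _, result => result
  | 0, _ :: _, _, result => result
  | fuel + 1, current :: rest, visited, result =>
    let result' := if !models_only || PySem.Str.startswith current "model." then result ++ [current] else result
    let vq := (pvChildren child_map current).foldl pvBfsStep (visited, rest)
    pvBfsLoop child_map models_only fuel vq.2 vq.1 result'

def find_downstream (node_id : String) (child_map : List (String × List String)) (models_only : Bool) : List String :=
  let vq := (pvChildren child_map node_id).foldl pvBfsStep (PySem.Set.ofList [node_id], [])
  PySem.List.sorted (pvBfsLoop child_map models_only (1 + (child_map.flatMap Prod.snd).length) vq.2 vq.1 []) (fun x => x) false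

-- ===== PORT B =====
-- 'if child not in visited: visited.add(child); changed = True'
def pvSatAdd (s : PySem.Set String × Bool) (child : String) : PySem.Set String × Bool :=
  if PySem.Set.contains s.1 child then s else (PySem.Set.add s.1 child, true)

-- one sweep 'for current in list(visited): for child in …'
def pvSatPass (child_map : List (String × List String)) (visited : PySem.Set String) : PySem.Set String × Bool :=
  visited.foldl (fun s current => (pvChildren child_map current).foldl pvSatAdd s) (visited, false)

-- 'while changed:' — run a sweep, repeat while it changed something (fuel only makes it total)
def pvSatLoop (child_map : List (String × List String)) : Nat → PySem.Set String → PySem.Set String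
  | 0, visited => visited
  | fuel + 1, visited =>
    let r := pvSatPass child_map visited
    if r.2 then pvSatLoop child_map fuel r.1 else r.1

def find_downstream_alt (node_id : String) (child_map : List (String × List String)) (models_only : Bool) : List String :=
  let visited := pvSatLoop child_map (1 + (child_map.flatMap Prod.snd).length) (PySem.Set.ofList [node_id])
  PySem.List.sorted
    (visited.filter (fun n => n != node_id && (!models_only || PySem.Str.startswith n "model.")))
    (fun x => x) false

-- ===== PRECONDITION & SPEC =====
def Spec_find_downstream (node_id : String) (child_map : List (String × List String)) (models_only : Bool) (out : List String) : Prop := out = find_downstream_alt node_id child_map models_only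
instance (node_id : String) (child_map : List (String × List String)) (models_only : Bool) (out : List String) : Decidable (Spec_find_downstream node_id child_map models_only out) := by unfold Spec_find_downstream; infer_instance

-- ===== CLAIM (what is proved, stated in full; the proofs are below) =====
def Claim_equal_find_downstream : Prop := ∀ (node_id : String) (child_map : List (String × List String)) (models_only : Bool), Dom_find_downstream node_id child_map models_only → Spec_find_downstream node_id child_map models_only (find_downstream node_id child_map models_only)

-- ===== LEMMAS AND PROOFS =====

-- V is closed under taking children
def pvClosed (child_map : List (String × List String)) (V : List String) : Prop :=
  ∀ x ∈ V, ∀ y ∈ pvChildren child_map x, y ∈ V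

theorem pvChildren_subset_flatMap (child_map : List (String × List String)) (k : String) :
    pvChildren child_map k ⊆ child_map.flatMap Prod.snd := by
  unfold pvChildren
  cases hf : child_map.find? (fun p => p.1 == k) with
  | none => simp
  | some p =>
    intro y hy
    exact List.mem_flatMap.mpr ⟨p, List.mem_of_find?_eq_some hf, hy⟩

theorem pvNodup_length_le {l l' : List String} (h : l.Nodup) (hs : l ⊆ l') :
    l.length ≤ l'.length := by
  calc l.length = l.toFinset.card := (List.toFinset_card_of_nodup h).symm
    _ ≤ l'.toFinset.card := Finset.card_le_card (fun x hx => by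
        simp only [List.mem_toFinset] at *; exact hs hx)
    _ ≤ l'.length := l'.toFinset_card_le

-- the A-side seeding/enqueueing fold adds the same new elements to visited and to the queue
theorem pvBfsFold_spec (cs : List String) : ∀ (v q : List String),
    ∃ d : List String, cs.foldl pvBfsStep (v, q) = (v ++ d, q ++ d) ∧ d.Nodup ∧
      (∀ x ∈ d, x ∈ cs ∧ x ∉ v) ∧ (∀ x ∈ cs, x ∈ v ++ d) := by
  induction cs with
  | nil => intro v q; exact ⟨[], by simp⟩
  | cons c cs ih =>
    intro v q
    by_cases hc : c ∈ v
    · obtain ⟨d, h1, h2, h3, h4⟩ := ih v q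
      have hstep : pvBfsStep (v, q) c = (v, q) := by simp [pvBfsStep, hc]
      refine ⟨d, ?_, h2, ?_, ?_⟩
      · simpa [List.foldl_cons, hstep] using h1
      · exact fun x hx => ⟨List.mem_cons_of_mem _ (h3 x hx).1, (h3 x hx).2⟩
      · intro x hx
        rcases List.mem_cons.mp hx with rfl | hx'
        · exact List.mem_append_left _ hc
        · exact h4 x hx'
    · obtain ⟨d, h1, h2, h3, h4⟩ := ih (v ++ [c]) (q ++ [c])
      have hstep : pvBfsStep (v, q) c = (v ++ [c], q ++ [c]) := by
        simp [pvBfsStep, PySem.Set.add, hc]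
      refine ⟨c :: d, ?_, ?_, ?_, ?_⟩
      · simp only [List.foldl_cons, hstep, h1]
        simp
      · exact List.nodup_cons.mpr ⟨fun h => (h3 c h).2 (by simp), h2⟩
      · intro x hx
        rcases List.mem_cons.mp hx with rfl | hx'
        · exact ⟨List.mem_cons_self, hc⟩
        · exact ⟨List.mem_cons_of_mem _ (h3 x hx').1,
            fun hv => (h3 x hx').2 (List.mem_append_left _ hv)⟩
      · intro x hx
        rcases List.mem_cons.mp hx with rfl | hx'
        · simp
        · have := h4 x hx'
          simp only [List.append_assoc, List.singleton_append] at this ⊢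
          exact this

-- the B-side inner fold over one node's children
theorem pvSatAddFold_spec (cs : List String) : ∀ (v : List String) (b : Bool),
    ∃ d : List String, cs.foldl pvSatAdd (v, b) = (v ++ d, b || !d.isEmpty) ∧ d.Nodup ∧
      (∀ x ∈ d, x ∈ cs ∧ x ∉ v) ∧ (∀ x ∈ cs, x ∈ v ++ d) := by
  induction cs with
  | nil => intro v b; exact ⟨[], by simp⟩
  | cons c cs ih =>
    intro v b
    by_cases hc : c ∈ v
    · obtain ⟨d, h1, h2, h3, h4⟩ := ih v b
      have hstep : pvSatAdd (v, b) c = (v, b) := by simp [pvSatAdd, hc]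
      refine ⟨d, ?_, h2, ?_, ?_⟩
      · simpa [List.foldl_cons, hstep] using h1
      · exact fun x hx => ⟨List.mem_cons_of_mem _ (h3 x hx).1, (h3 x hx).2⟩
      · intro x hx
        rcases List.mem_cons.mp hx with rfl | hx'
        · exact List.mem_append_left _ hc
        · exact h4 x hx'
    · obtain ⟨d, h1, h2, h3, h4⟩ := ih (v ++ [c]) true
      have hstep : pvSatAdd (v, b) c = (v ++ [c], true) := by
        simp [pvSatAdd, PySem.Set.add, hc]
      refine ⟨c :: d, ?_, ?_, ?_, ?_⟩
      · simp only [List.foldl_cons, hstep, h1]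
        simp
      · exact List.nodup_cons.mpr ⟨fun h => (h3 c h).2 (by simp), h2⟩
      · intro x hx
        rcases List.mem_cons.mp hx with rfl | hx'
        · exact ⟨List.mem_cons_self, hc⟩
        · exact ⟨List.mem_cons_of_mem _ (h3 x hx').1,
            fun hv => (h3 x hx').2 (List.mem_append_left _ hv)⟩
      · intro x hx
        rcases List.mem_cons.mp hx with rfl | hx'
        · simp
        · have := h4 x hx'
          simp only [List.append_assoc, List.singleton_append] at this ⊢
          exact this


-- one whole sweep of B
theorem pvSatPassGen_spec (child_map : List (String × List String)) (kk : List String) :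
    ∀ (v : List String) (b : Bool),
    ∃ E : List String,
      kk.foldl (fun s current => (pvChildren child_map current).foldl pvSatAdd s) (v, b) = (v ++ E, b || !E.isEmpty) ∧
      E.Nodup ∧ (∀ x ∈ E, x ∉ v ∧ ∃ k ∈ kk, x ∈ pvChildren child_map k) ∧
      (∀ k ∈ kk, ∀ y ∈ pvChildren child_map k, y ∈ v ++ E) := by
  induction kk with
  | nil => intro v b; exact ⟨[], by simp⟩
  | cons k kk ih =>
    intro v b
    obtain ⟨d, hd1, hd2, hd3, hd4⟩ := pvSatAddFold_spec (pvChildren child_map k) v b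
    obtain ⟨E', hE1, hE2, hE3, hE4⟩ := ih (v ++ d) (b || !d.isEmpty)
    refine ⟨d ++ E', ?_, ?_, ?_, ?_⟩
    · simp only [List.foldl_cons, hd1, hE1, List.append_assoc]
      congr 1
      cases d <;> cases E' <;> simp
    · exact List.Nodup.append hd2 hE2 (fun x hx hx' => (hE3 x hx').1 (List.mem_append_right _ hx))
    · intro x hx
      rcases List.mem_append.mp hx with hx' | hx'
      · exact ⟨(hd3 x hx').2, k, List.mem_cons_self, (hd3 x hx').1⟩
      · obtain ⟨hnv, k', hk', hc'⟩ := hE3 x hx'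
        exact ⟨fun h => hnv (List.mem_append_left _ h), k', List.mem_cons_of_mem _ hk', hc'⟩
    · intro k' hk' y hy
      rcases List.mem_cons.mp hk' with rfl | hk''
      · rcases List.mem_append.mp (hd4 y hy) with h | h
        · exact List.mem_append_left _ h
        · exact List.mem_append_right _ (List.mem_append_left _ h)
      · have := hE4 k' hk'' y hy
        simp only [List.append_assoc] at this ⊢
        exact this

-- B's saturation loop computes the least closed superset
theorem pvSatLoop_spec (child_map : List (String × List String)) (U : List String)
    (hUc : ∀ x, pvChildren child_map x ⊆ U) :
    ∀ (fuel : Nat) (v : List String), v.Nodup → v ⊆ U → U.length + 1 ≤ fuel + v.length →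
    ∃ Vf, pvSatLoop child_map fuel v = Vf ∧ Vf.Nodup ∧ v ⊆ Vf ∧ pvClosed child_map Vf ∧
      (∀ W, v ⊆ W → pvClosed child_map W → Vf ⊆ W) := by
  intro fuel
  induction fuel with
  | zero =>
    intro v hn hsub hf
    have := pvNodup_length_le hn hsub
    omega
  | succ fuel ih =>
    intro v hn hsub hf
    obtain ⟨E, hE1, hE2, hE3, hE4⟩ := pvSatPassGen_spec child_map v v false
    have hpass : pvSatPass child_map v = (v ++ E, !E.isEmpty) := by
      simpa [pvSatPass] using hE1
    cases hEe : E with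
    | nil =>
      refine ⟨v, ?_, hn, fun x hx => hx, ?_, fun W hW _ => hW⟩
      · simp [pvSatLoop, hpass, hEe]
      · intro x hx y hy
        have := hE4 x hx y hy
        simpa [hEe] using this
    | cons e0 E' =>
      subst hEe
      have hvE_nodup : (v ++ (e0 :: E')).Nodup :=
        List.Nodup.append hn hE2 (fun x hx hx' => (hE3 x hx').1 hx)
      have hvE_sub : (v ++ (e0 :: E')) ⊆ U := by
        intro x hx
        rcases List.mem_append.mp hx with h | h
        · exact hsub h
        · obtain ⟨_, k, _, hc⟩ := hE3 x h
          exact hUc k hc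
      have hlen : U.length + 1 ≤ fuel + (v ++ (e0 :: E')).length := by
        simp only [List.length_append, List.length_cons]
        omega
      obtain ⟨Vf, h1, h2, h3, h4, h5⟩ := ih (v ++ (e0 :: E')) hvE_nodup hvE_sub hlen
      refine ⟨Vf, ?_, h2, fun x hx => h3 (List.mem_append_left _ hx), h4, ?_⟩
      · simpa [pvSatLoop, hpass] using h1
      · intro W hW hWc
        refine h5 W ?_ hWc
        intro x hx
        rcases List.mem_append.mp hx with h | h
        · exact hW h
        · obtain ⟨_, k, hk, hc⟩ := hE3 x h
          exact hWc k (hW hk) x hc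

-- A's BFS loop: the produced suffix is the filtered set of newly reachable nodes
theorem pvBfsLoop_spec (child_map : List (String × List String)) (models_only : Bool)
    (U : List String) (hUc : ∀ x, pvChildren child_map x ⊆ U) :
    ∀ (fuel : Nat) (queue visited result : List String),
    visited.Nodup → (∀ x ∈ queue, x ∈ visited) → queue.Nodup →
    (∀ x ∈ visited, x ∉ queue → ∀ y ∈ pvChildren child_map x, y ∈ visited) →
    visited ⊆ U → queue.length + U.length ≤ fuel + visited.length →
    ∃ Vf tail,
      pvBfsLoop child_map models_only fuel queue visited result = result ++ tail ∧
      Vf.Nodup ∧ visited ⊆ Vf ∧ pvClosed child_map Vf ∧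
      (∀ W, visited ⊆ W → pvClosed child_map W → Vf ⊆ W) ∧
      tail.Nodup ∧
      (∀ x, x ∈ tail ↔ x ∈ Vf ∧ (x ∈ queue ∨ x ∉ visited) ∧
        (!models_only || PySem.Str.startswith x "model.") = true) := by
  intro fuel
  induction fuel with
  | zero =>
    intro queue visited result hvn hqv hqn hcl hvU hf
    have hlen := pvNodup_length_le hvn hvU
    have hq0 : queue = [] := by
      cases queue with
      | nil => rfl
      | cons a l => exfalso; simp only [List.length_cons] at hf; omega
    subst hq0
    refine ⟨visited, [], by simp [pvBfsLoop], hvn, fun x hx => hx, ?_, fun W hW _ => hW, by simp, ?_⟩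
    · intro x hx y hy
      exact hcl x hx (by simp) y hy
    · intro x
      constructor
      · intro h; exact absurd h (by simp)
      · rintro ⟨hVf, h' | h', _⟩
        · exact absurd h' (by simp)
        · exact absurd hVf h'
  | succ fuel ih =>
    intro queue visited result hvn hqv hqn hcl hvU hf
    cases queue with
    | nil =>
      refine ⟨visited, [], by simp [pvBfsLoop], hvn, fun x hx => hx, ?_, fun W hW _ => hW, by simp, ?_⟩
      · intro x hx y hy
        exact hcl x hx (by simp) y hy
      · intro x
        constructor
        · intro h; exact absurd h (by simp)
        · rintro ⟨hVf, h' | h', _⟩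
          · exact absurd h' (by simp)
          · exact absurd hVf h'
    | cons current rest =>
      obtain ⟨d, hd1, hd2, hd3, hd4⟩ := pvBfsFold_spec (pvChildren child_map current) visited rest
      have hcurv : current ∈ visited := hqv current List.mem_cons_self
      have hcur_nrest : current ∉ rest := (List.nodup_cons.mp hqn).1
      have hrest_n : rest.Nodup := (List.nodup_cons.mp hqn).2
      have hvn' : (visited ++ d).Nodup :=
        List.Nodup.append hvn hd2 (fun x hx hx' => (hd3 x hx').2 hx)
      have hqv' : ∀ x ∈ rest ++ d, x ∈ visited ++ d := by
        intro x hx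
        rcases List.mem_append.mp hx with h | h
        · exact List.mem_append_left _ (hqv x (List.mem_cons_of_mem _ h))
        · exact List.mem_append_right _ h
      have hqn' : (rest ++ d).Nodup :=
        List.Nodup.append hrest_n hd2
          (fun x hx hx' => (hd3 x hx').2 (hqv x (List.mem_cons_of_mem _ hx)))
      have hcl' : ∀ x ∈ visited ++ d, x ∉ rest ++ d → ∀ y ∈ pvChildren child_map x, y ∈ visited ++ d := by
        intro x hx hnx y hy
        rcases List.mem_append.mp hx with h | h
        · by_cases hxc : x = current
          · subst hxc; exact hd4 y hy
          · have hx_nq : x ∉ current :: rest := by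
              intro hq
              rcases List.mem_cons.mp hq with h' | h'
              · exact hxc h'
              · exact hnx (List.mem_append_left _ h')
            exact List.mem_append_left _ (hcl x h hx_nq y hy)
        · exact absurd (List.mem_append_right _ h) hnx
      have hvU' : visited ++ d ⊆ U := by
        intro x hx
        rcases List.mem_append.mp hx with h | h
        · exact hvU h
        · exact hUc current (hd3 x h).1
      have hf' : (rest ++ d).length + U.length ≤ fuel + (visited ++ d).length := by
        simp only [List.length_append]
        simp only [List.length_cons] at hf
        omega
      obtain ⟨Vf, tail', h1, h2, h3, h4, h5, h6, h7⟩ :=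
        ih (rest ++ d) (visited ++ d) (if !models_only || PySem.Str.startswith current "model."
          then result ++ [current] else result) hvn' hqv' hqn' hcl' hvU' hf'
      have hrun : pvBfsLoop child_map models_only (fuel + 1) (current :: rest) visited result =
          pvBfsLoop child_map models_only fuel (rest ++ d) (visited ++ d)
            (if !models_only || PySem.Str.startswith current "model." then result ++ [current] else result) := by
        simp only [pvBfsLoop, hd1]
      have hcurVf : current ∈ Vf := h3 (List.mem_append_left _ hcurv)
      have hcur_ntail' : current ∉ tail' := by
        intro h
        obtain ⟨_, hcond, _⟩ := (h7 current).mp h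
        rcases hcond with h' | h'
        · rcases List.mem_append.mp h' with h'' | h''
          · exact hcur_nrest h''
          · exact (hd3 current h'').2 hcurv
        · exact h' (List.mem_append_left _ hcurv)
      refine ⟨Vf, (if !models_only || PySem.Str.startswith current "model." then [current] else []) ++ tail',
        ?_, h2, fun x hx => h3 (List.mem_append_left _ hx), h4, ?_, ?_, ?_⟩
      · rw [hrun, h1]
        cases hP : (!models_only || PySem.Str.startswith current "model.") <;> simp
      · intro W hW hWc
        refine h5 W ?_ hWc
        intro x hx
        rcases List.mem_append.mp hx with h | h
        · exact hW h
        · exact hWc current (hW hcurv) x (hd3 x h).1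
      · cases hP : (!models_only || PySem.Str.startswith current "model.")
        · simpa using h6
        · simpa using List.nodup_cons.mpr ⟨hcur_ntail', h6⟩
      · intro x
        constructor
        · intro hx
          rcases List.mem_append.mp hx with h | h
          · cases hP : (!models_only || PySem.Str.startswith current "model.")
            · rw [hP] at h; exact absurd h (by simp)
            · rw [hP] at h
              have hx_cur : x = current := by simpa using h
              subst hx_cur
              exact ⟨hcurVf, Or.inl List.mem_cons_self, hP⟩
          · obtain ⟨hVf, hcond, hpred⟩ := (h7 x).mp h
            refine ⟨hVf, ?_, hpred⟩
            rcases hcond with h' | h'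
            · rcases List.mem_append.mp h' with h'' | h''
              · exact Or.inl (List.mem_cons_of_mem _ h'')
              · exact Or.inr (hd3 x h'').2
            · exact Or.inr (fun hv => h' (List.mem_append_left _ hv))
        · rintro ⟨hVf, hcond, hpred⟩
          by_cases hxc : x = current
          · subst hxc
            refine List.mem_append_left _ ?_
            rw [hpred]
            simp
          · have hx_tail' : x ∈ tail' := by
              refine (h7 x).mpr ⟨hVf, ?_, hpred⟩
              rcases hcond with h' | h'
              · rcases List.mem_cons.mp h' with h'' | h''
                · exact absurd h'' hxc
                · exact Or.inl (List.mem_append_left _ h'')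
              · by_cases hxd : x ∈ d
                · exact Or.inl (List.mem_append_right _ hxd)
                · exact Or.inr (fun hv => (List.mem_append.mp hv).elim h' hxd)
            exact List.mem_append_right _ hx_tail'

-- ===== VERDICT (by name: the statement is the Claim_ definition above) =====

theorem find_downstream_spec : Claim_equal_find_downstream := by
  intro node_id child_map models_only _hdom
  unfold Spec_find_downstream
  have hv0 : PySem.Set.ofList [node_id] = [node_id] := by
    simp [PySem.Set.ofList_eq_self_of_nodup]
  have hUc : ∀ x, pvChildren child_map x ⊆ PySem.Set.ofList (node_id :: child_map.flatMap Prod.snd) := by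
    intro x y hy
    exact (PySem.Set.mem_ofList _ _).mpr (List.mem_cons_of_mem _ (pvChildren_subset_flatMap child_map x hy))
  have hnidU : node_id ∈ PySem.Set.ofList (node_id :: child_map.flatMap Prod.snd) :=
    (PySem.Set.mem_ofList _ _).mpr List.mem_cons_self
  have hUlen : (PySem.Set.ofList (node_id :: child_map.flatMap Prod.snd)).length ≤
      (child_map.flatMap Prod.snd).length + 1 := by
    have h := PySem.Set.length_ofList_le (node_id :: child_map.flatMap Prod.snd)
    simpa only [List.length_cons] using h
  -- A side: seed fold then BFS loop
  obtain ⟨d0, hd1, hd2, hd3, hd4⟩ := pvBfsFold_spec (pvChildren child_map node_id) [node_id] []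
  rw [List.nil_append] at hd1
  have hnid_d0 : node_id ∉ d0 := fun h => (hd3 node_id h).2 (List.mem_singleton.mpr rfl)
  have hvn0 : ([node_id] ++ d0).Nodup := by
    refine List.Nodup.append (by simp) hd2 ?_
    intro x hx hx'
    rcases List.mem_singleton.mp hx with rfl
    exact hnid_d0 hx'
  have hvU0 : ([node_id] ++ d0) ⊆ PySem.Set.ofList (node_id :: child_map.flatMap Prod.snd) := by
    intro x hx
    rcases List.mem_append.mp hx with h | h
    · rcases List.mem_singleton.mp h with rfl; exact hnidU
    · exact hUc node_id (hd3 x h).1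
  obtain ⟨VfA, tailA, hA1, hA2, hA3, hA4, hA5, hA6, hA7⟩ :=
    pvBfsLoop_spec child_map models_only (PySem.Set.ofList (node_id :: child_map.flatMap Prod.snd))
      hUc (1 + (child_map.flatMap Prod.snd).length) d0 ([node_id] ++ d0) []
      hvn0
      (fun x hx => List.mem_append_right _ hx)
      hd2
      (by
        intro x hx hnx y hy
        rcases List.mem_append.mp hx with h | h
        · rcases List.mem_singleton.mp h with rfl
          exact hd4 y hy
        · exact absurd h hnx)
      hvU0
      (by simp only [List.length_append, List.length_cons, List.length_nil]; omega)
  -- B side: saturation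
  obtain ⟨Vb, hBeq, hBn, hBsub, hBcl, hBmin⟩ :=
    pvSatLoop_spec child_map (PySem.Set.ofList (node_id :: child_map.flatMap Prod.snd)) hUc
      (1 + (child_map.flatMap Prod.snd).length) [node_id]
      (by simp) (fun x hx => by rcases List.mem_singleton.mp hx with rfl; exact hnidU)
      (by simp only [List.length_cons, List.length_nil]; omega)
  -- the two least closed supersets coincide
  have hAB : VfA ⊆ Vb := by
    refine hA5 Vb ?_ hBcl
    intro x hx
    rcases List.mem_append.mp hx with h | h
    · rcases List.mem_singleton.mp h with rfl
      exact hBsub (List.mem_singleton.mpr rfl)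
    · exact hBcl node_id (hBsub (List.mem_singleton.mpr rfl)) x (hd3 x h).1
  have hBA : Vb ⊆ VfA := by
    refine hBmin VfA ?_ hA4
    intro x hx
    rcases List.mem_singleton.mp hx with rfl
    exact hA3 (List.mem_append_left _ (List.mem_singleton.mpr rfl))
  -- the two pre-sort lists are permutations of one another
  have hmem : ∀ x, x ∈ tailA ↔
      x ∈ Vb.filter (fun n => n != node_id && (!models_only || PySem.Str.startswith n "model.")) := by
    intro x
    rw [List.mem_filter, hA7 x, Bool.and_eq_true, bne_iff_ne]
    constructor
    · rintro ⟨hVf, hcond, hpred⟩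
      refine ⟨hAB hVf, ?_, hpred⟩
      rcases hcond with h | h
      · exact fun he => hnid_d0 (he ▸ h)
      · exact fun he => h (he ▸ List.mem_append_left _ (List.mem_singleton.mpr rfl))
    · rintro ⟨hVb, hne, hpred⟩
      refine ⟨hBA hVb, ?_, hpred⟩
      by_cases hxd : x ∈ d0
      · exact Or.inl hxd
      · refine Or.inr ?_
        intro hv
        rcases List.mem_append.mp hv with h | h
        · exact hne (List.mem_singleton.mp h)
        · exact hxd h
  have hperm : tailA.Perm
      (Vb.filter (fun n => n != node_id && (!models_only || PySem.Str.startswith n "model."))) :=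
    (List.perm_ext_iff_of_nodup hA6 (List.Nodup.filter _ hBn)).mpr hmem
  -- assemble both sides
  have hAout : find_downstream node_id child_map models_only =
      PySem.List.sorted tailA (fun x => x) false := by
    unfold find_downstream
    simp only [hv0, hd1, hA1]
    simp
  have hBout : find_downstream_alt node_id child_map models_only =
      PySem.List.sorted
        (Vb.filter (fun n => n != node_id && (!models_only || PySem.Str.startswith n "model.")))
        (fun x => x) false := by
    unfold find_downstream_alt
    simp only [hv0, hBeq]
  rw [hAout, hBout]
  exact PySem.List.sorted_eq_sorted_of_perm _ _ _ (fun a b h => h) hperm
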